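-- pv_equiv track=rewrite | github.com/jeremysule/hackerrank_python | hackerrank/algorithms/dynamicprogramming/NikitaAndTheGame.py | nikita
-- ===== SOURCE A (Python) =====
-- def nikita(arg_array):
--     len_array = len(arg_array)
--     if len_array == 0 or len_array == 1:
--         return 0
--     sum_array = sum(arg_array)
--     if sum_array%2 == 1:
--         return 0
--     if sum_array == 0:
--         return len_array-1
--     acc = 0
--     for i in range(len_array):
--         acc += arg_array[i]
--         if acc == sum_array//2:
--             return 1 + max(nikita(arg_array[:i + 1]), nikita(arg_array[i + 1:]))
--     return 0
-- ===== SOURCE B (Python) =====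
-- def nikita(arg_array):
--     n = len(arg_array)
--     prefix = [0]
--     for v in arg_array:
--         prefix.append(prefix[-1] + v)
--     best = 0
--     stack = [(0, n, 0)]
--     while stack:
--         lo, hi, d = stack.pop()
--         if best < d:
--             best = d
--         if hi - lo <= 1:
--             continue
--         s = prefix[hi] - prefix[lo]
--         if s % 2 == 1:
--             continue
--         if s == 0:
--             best = max(best, d + hi - lo - 1)
--             continue
--         half = s // 2
--         for i in range(lo, hi):
--             if prefix[i + 1] - prefix[lo] == half:
--                 stack.append((lo, i + 1, d + 1))
--                 stack.append((i + 1, hi, d + 1))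
--                 break
--     return best
-- ===== Notes on version B (the rewrite author's own statement) =====
-- stated objective: alternative
-- what changed: B eliminates the recursion entirely: it runs an explicit-stack worklist over index segments with a global prefix-sum array and computes the answer as the maximum depth (plus the zero-sum bonus) reached over all generated segments, instead of A's 1+max recursive evaluation with slice copies and re-summation.
import Mathlib
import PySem

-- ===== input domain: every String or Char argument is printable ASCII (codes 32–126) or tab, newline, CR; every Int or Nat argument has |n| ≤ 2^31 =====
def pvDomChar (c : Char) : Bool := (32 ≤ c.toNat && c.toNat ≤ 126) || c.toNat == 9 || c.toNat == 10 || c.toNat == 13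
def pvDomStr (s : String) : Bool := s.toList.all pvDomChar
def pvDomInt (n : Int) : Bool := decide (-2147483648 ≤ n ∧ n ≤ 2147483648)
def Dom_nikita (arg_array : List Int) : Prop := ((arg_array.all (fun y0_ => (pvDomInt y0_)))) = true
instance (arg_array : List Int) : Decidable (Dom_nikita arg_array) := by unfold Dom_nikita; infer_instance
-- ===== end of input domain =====

-- B replaces A's recursive 1+max evaluation (with slice copies and re-summation) by an
-- explicit-stack worklist over index segments with a global prefix-sum array, returning the
-- maximum depth reached (objective: alternative structure; same worst-case cost).


-- ===== PORT A =====
-- A's for-loop: acc starts at 0, adds arg_array[i]; first i with acc == target (none if no hit).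
def nikitaFind : List Int → Int → Int → Option Nat
  | [], _, _ => none
  | x :: xs, target, acc =>
    if acc + x = target then some 0
    else (nikitaFind xs target (acc + x)).map (· + 1)

-- needed by nikita's termination proof (cited in decreasing_by)
theorem nikitaFind_spec : ∀ (xs : List Int) (t acc : Int) (i : Nat),
    nikitaFind xs t acc = some i → i < xs.length ∧ acc + (xs.take (i + 1)).sum = t := by
  intro xs
  induction xs with
  | nil => intro t acc i h; simp [nikitaFind] at h
  | cons x xs ih =>
    intro t acc i h
    simp only [nikitaFind] at h
    split at h
    · rename_i hx
      cases h
      simpa using hx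
    · rcases Option.map_eq_some_iff.mp h with ⟨j, hj, rfl⟩
      obtain ⟨h1, h2⟩ := ih t (acc + x) j hj
      constructor
      · simpa using Nat.succ_lt_succ h1
      · simpa [List.take_succ_cons, add_assoc] using h2

-- the split index is never the last index (sum even and nonzero), needed for termination
theorem nikita_split_lt (arr : List Int) (i : Nat)
    (hm : ¬ PySem.Int.mod arr.sum 2 = 1) (h0 : ¬ arr.sum = 0)
    (h : nikitaFind arr (PySem.Int.floordiv arr.sum 2) 0 = some i) :
    i + 1 < arr.length := by
  obtain ⟨hi, hsum⟩ := nikitaFind_spec _ _ _ _ h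
  by_contra hge
  have he : i + 1 = arr.length := by omega
  rw [he, List.take_length] at hsum
  have hmn : 0 ≤ PySem.Int.mod arr.sum 2 := PySem.Int.mod_nonneg arr.sum (by norm_num)
  have hml : PySem.Int.mod arr.sum 2 < 2 := PySem.Int.mod_lt arr.sum (by norm_num)
  have hfd := PySem.Int.floordiv_mul_add_mod arr.sum 2
  omega

-- literal port of A: slices arg_array[:i+1] / arg_array[i+1:] are take/drop (index i+1 ≥ 0, exact)
def nikita (arg_array : List Int) : Int :=
  if arg_array.length = 0 ∨ arg_array.length = 1 then 0
  else
    if hm : PySem.Int.mod arg_array.sum 2 = 1 then 0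
    else if h0 : arg_array.sum = 0 then (arg_array.length : Int) - 1
    else
      match h : nikitaFind arg_array (PySem.Int.floordiv arg_array.sum 2) 0 with
      | some i => 1 + max (nikita (arg_array.take (i + 1))) (nikita (arg_array.drop (i + 1)))
      | none => 0
termination_by arg_array.length
decreasing_by
  · have := nikita_split_lt arg_array i hm h0 h
    simp [List.length_take]; omega
  · have := nikita_split_lt arg_array i hm h0 h
    simp [List.length_drop]; omega

-- ===== PORT B =====
-- B's prefix loop: running sums of xs starting from acc (B's prefix list is 0 :: altPrefix arr 0)
def altPrefix : List Int → Int → List Int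
  | [], _ => []
  | x :: xs, acc => (acc + x) :: altPrefix xs (acc + x)

-- prefix[i] (always in range in B; default 0 never read on admitted indices)
def pget (P : List Int) (i : Nat) : Int := P.getD i 0

-- B's inner for-loop over i in range(lo, lo+cnt): first i with prefix[i+1]-prefix[lo] == half
def altFind (P : List Int) (base half : Int) : Nat → Nat → Option Nat
  | _, 0 => none
  | lo, c + 1 =>
    if pget P (lo + 1) - base = half then some lo
    else altFind P base half (lo + 1) c

-- needed by altLoop's termination proof
theorem altFind_spec : ∀ (c lo : Nat) (P : List Int) (base half : Int) (i : Nat),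
    altFind P base half lo c = some i →
    lo ≤ i ∧ i < lo + c ∧ pget P (i + 1) - base = half := by
  intro c
  induction c with
  | zero => intro lo P base half i h; simp [altFind] at h
  | succ c ih =>
    intro lo P base half i h
    simp only [altFind] at h
    split at h
    · rename_i hx; cases h; exact ⟨le_refl _, by omega, hx⟩
    · obtain ⟨h1, h2, h3⟩ := ih (lo + 1) P base half i h
      exact ⟨by omega, by omega, h3⟩

-- the split index stays strictly inside the segment, needed for termination
theorem alt_split_lt (P : List Int) (lo hi i : Nat)
    (hm : ¬ PySem.Int.mod (pget P hi - pget P lo) 2 = 1)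
    (h0 : ¬ pget P hi - pget P lo = 0)
    (h : altFind P (pget P lo) (PySem.Int.floordiv (pget P hi - pget P lo) 2) lo (hi - lo) = some i) :
    lo ≤ i ∧ i + 1 < hi := by
  obtain ⟨h1, h2, h3⟩ := altFind_spec _ _ _ _ _ _ h
  refine ⟨h1, ?_⟩
  by_contra hge
  have he : i + 1 = hi := by omega
  rw [he] at h3
  have hmn : 0 ≤ PySem.Int.mod (pget P hi - pget P lo) 2 :=
    PySem.Int.mod_nonneg _ (by norm_num)
  have hml : PySem.Int.mod (pget P hi - pget P lo) 2 < 2 :=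
    PySem.Int.mod_lt _ (by norm_num)
  have hfd := PySem.Int.floordiv_mul_add_mod (pget P hi - pget P lo) 2
  omega

-- needed by altLoop's termination proof (strict decrease of the 3^length measure on a split)
theorem three_pow_half (a b : Nat) (ha : 1 ≤ a) (hab : a ≤ b) : 3 ^ a + 3 ^ b < 3 ^ (a + b) := by
  have h1 : 3 ^ a ≤ 3 ^ b := Nat.pow_le_pow_right (by norm_num) hab
  have h2 : 0 < 3 ^ b := Nat.pow_pos (by norm_num)
  have h3 : 3 ^ (b + 1) ≤ 3 ^ (a + b) := Nat.pow_le_pow_right (by norm_num) (by omega)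
  have h4 : 3 ^ (b + 1) = 3 * 3 ^ b := by rw [pow_succ, Nat.mul_comm]
  omega

theorem three_pow_lt (a b : Nat) (ha : 1 ≤ a) (hb : 1 ≤ b) : 3 ^ a + 3 ^ b < 3 ^ (a + b) := by
  rcases Nat.le_total a b with h | h
  · exact three_pow_half a b ha h
  · have := three_pow_half b a hb h
    rw [show b + a = a + b from Nat.add_comm b a] at this
    omega

-- B's while-loop: explicit stack of (lo, hi, depth) segments; best is the running maximum
-- ('if best < d: best = d' is max best d). Lean list head = Python stack top, so the two
-- children are pushed with the right part on top, as Python pops the last append first.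
def altLoop (P : List Int) : List (Nat × Nat × Int) → Int → Int
  | [], best => best
  | (lo, hi, d) :: rest, best =>
    if hi - lo ≤ 1 then altLoop P rest (max best d)
    else if hm : PySem.Int.mod (pget P hi - pget P lo) 2 = 1 then altLoop P rest (max best d)
    else if h0 : pget P hi - pget P lo = 0 then
      altLoop P rest (max (max best d) (d + (hi : Int) - (lo : Int) - 1))
    else
      match h : altFind P (pget P lo) (PySem.Int.floordiv (pget P hi - pget P lo) 2) lo (hi - lo) with
      | some i => altLoop P ((i + 1, hi, d + 1) :: (lo, i + 1, d + 1) :: rest) (max best d)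
      | none => altLoop P rest (max best d)
termination_by stack _ => (stack.map (fun e => 3 ^ (e.2.1 - e.1))).sum
decreasing_by
  · have := (Nat.pow_pos (show 0 < 3 by norm_num) : 0 < 3 ^ (hi - lo))
    simp only [List.map_cons, List.sum_cons]; omega
  · have := (Nat.pow_pos (show 0 < 3 by norm_num) : 0 < 3 ^ (hi - lo))
    simp only [List.map_cons, List.sum_cons]; omega
  · have := (Nat.pow_pos (show 0 < 3 by norm_num) : 0 < 3 ^ (hi - lo))
    simp only [List.map_cons, List.sum_cons]; omega
  · obtain ⟨hl, hr⟩ := alt_split_lt P lo hi i hm h0 h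
    have hp := three_pow_lt (i + 1 - lo) (hi - (i + 1)) (by omega) (by omega)
    rw [show (i + 1 - lo) + (hi - (i + 1)) = hi - lo by omega] at hp
    simp only [List.map_cons, List.sum_cons]; omega
  · have := (Nat.pow_pos (show 0 < 3 by norm_num) : 0 < 3 ^ (hi - lo))
    simp only [List.map_cons, List.sum_cons]; omega

def nikita_alt (arg_array : List Int) : Int :=
  altLoop (0 :: altPrefix arg_array 0) [(0, arg_array.length, 0)] 0

-- ===== PRECONDITION & SPEC =====
def Spec_nikita (arg_array : List Int) (out : Int) : Prop := out = nikita_alt arg_array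
instance (arg_array : List Int) (out : Int) : Decidable (Spec_nikita arg_array out) := by unfold Spec_nikita; infer_instance

-- ===== CLAIM (what is proved, stated in full; the proofs are below) =====
def Claim_equal_nikita : Prop := ∀ (arg_array : List Int), Dom_nikita arg_array → Spec_nikita arg_array (nikita arg_array)

-- ===== LEMMAS AND PROOFS =====

-- proof-only recursive value of a segment (bridges B's worklist to A's recursion)
def altSolve (P : List Int) (lo hi : Nat) : Int :=
  if hi - lo ≤ 1 then 0
  else
    if hm : PySem.Int.mod (pget P hi - pget P lo) 2 = 1 then 0
    else if h0 : pget P hi - pget P lo = 0 then (hi : Int) - (lo : Int) - 1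
    else
      match h : altFind P (pget P lo) (PySem.Int.floordiv (pget P hi - pget P lo) 2) lo (hi - lo) with
      | some i => 1 + max (altSolve P lo (i + 1)) (altSolve P (i + 1) hi)
      | none => 0
termination_by hi - lo
decreasing_by
  · have := alt_split_lt P lo hi i hm h0 h
    omega
  · have := alt_split_lt P lo hi i hm h0 h
    omega

theorem altSolve_split (P : List Int) (lo hi i : Nat) (h : ¬ hi - lo ≤ 1)
    (hm : ¬ PySem.Int.mod (pget P hi - pget P lo) 2 = 1)
    (h0 : ¬ pget P hi - pget P lo = 0)
    (hf : altFind P (pget P lo) (PySem.Int.floordiv (pget P hi - pget P lo) 2) lo (hi - lo) = some i) :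
    altSolve P lo hi = 1 + max (altSolve P lo (i + 1)) (altSolve P (i + 1) hi) := by
  rw [altSolve, if_neg h, dif_neg hm, dif_neg h0]
  split
  · rename_i j hj
    rw [hf] at hj
    obtain rfl := Option.some.inj hj
    rfl
  · rename_i hj
    rw [hf] at hj
    simp at hj

theorem altSolve_nosplit (P : List Int) (lo hi : Nat) (h : ¬ hi - lo ≤ 1)
    (hm : ¬ PySem.Int.mod (pget P hi - pget P lo) 2 = 1)
    (h0 : ¬ pget P hi - pget P lo = 0)
    (hf : altFind P (pget P lo) (PySem.Int.floordiv (pget P hi - pget P lo) 2) lo (hi - lo) = none) :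
    altSolve P lo hi = 0 := by
  rw [altSolve, if_neg h, dif_neg hm, dif_neg h0]
  split
  · rename_i j hj
    rw [hf] at hj
    simp at hj
  · rfl

theorem altSolve_nonneg (P : List Int) (lo hi : Nat) : 0 ≤ altSolve P lo hi := by
  induction lo, hi using altSolve.induct P with
  | case1 lo hi h => rw [altSolve, if_pos h]
  | case2 lo hi h hm => rw [altSolve, if_neg h, dif_pos hm]
  | case3 lo hi h hm h0 =>
    rw [altSolve, if_neg h, dif_neg hm, dif_pos h0]
    omega
  | case4 lo hi h hm h0 i hf ih1 ih2 =>
    rw [altSolve_split P lo hi i h hm h0 hf]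
    omega
  | case5 lo hi h hm h0 hf =>
    rw [altSolve_nosplit P lo hi h hm h0 hf]

-- loop invariant: the worklist computes the max over all stack entries of depth + segment value
theorem altLoop_inv (P : List Int) : ∀ (stack : List (Nat × Nat × Int)) (best : Int),
    altLoop P stack best
      = List.foldl max best (stack.map (fun e => e.2.2 + altSolve P e.1 e.2.1)) := by
  intro stack best
  induction stack, best using altLoop.induct P with
  | case1 best => rw [altLoop]; rfl
  | case2 lo hi d rest best h ih =>
    rw [altLoop]
    simp only [if_pos h]
    rw [ih, List.map_cons, List.foldl_cons]
    congr 1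
    rw [altSolve, if_pos h, add_zero]
  | case3 lo hi d rest best h hm ih =>
    rw [altLoop]
    simp only [if_neg h, dif_pos hm]
    rw [ih, List.map_cons, List.foldl_cons]
    congr 1
    rw [altSolve, if_neg h, dif_pos hm, add_zero]
  | case4 lo hi d rest best h hm h0 ih =>
    rw [altLoop]
    simp only [if_neg h, dif_neg hm, dif_pos h0]
    rw [ih, List.map_cons, List.foldl_cons]
    dsimp only
    congr 1
    rw [altSolve, if_neg h, dif_neg hm, dif_pos h0]
    have hge : (1 : Int) ≤ (hi : Int) - (lo : Int) - 1 := by omega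
    omega
  | case5 lo hi d rest best h hm h0 i hf ih =>
    rw [altLoop]
    simp only [if_neg h, dif_neg hm, dif_neg h0]
    have hstep : (match hx : altFind P (pget P lo) (PySem.Int.floordiv (pget P hi - pget P lo) 2) lo (hi - lo) with
        | some i => altLoop P ((i + 1, hi, d + 1) :: (lo, i + 1, d + 1) :: rest) (max best d)
        | none => altLoop P rest (max best d))
        = altLoop P ((i + 1, hi, d + 1) :: (lo, i + 1, d + 1) :: rest) (max best d) := by
      split
      · rename_i j hj
        rw [hf] at hj
        obtain rfl := Option.some.inj hj
        rfl
      · rename_i hj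
        rw [hf] at hj
        simp at hj
    rw [hstep, ih, List.map_cons, List.map_cons, List.map_cons,
      List.foldl_cons, List.foldl_cons, List.foldl_cons]
    dsimp only
    congr 1
    rw [altSolve_split P lo hi i h hm h0 hf]
    have hs1 := altSolve_nonneg P lo (i + 1)
    have hs2 := altSolve_nonneg P (i + 1) hi
    omega
  | case6 lo hi d rest best h hm h0 hf ih =>
    rw [altLoop]
    simp only [if_neg h, dif_neg hm, dif_neg h0]
    have hstep : (match hx : altFind P (pget P lo) (PySem.Int.floordiv (pget P hi - pget P lo) 2) lo (hi - lo) with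
        | some i => altLoop P ((i + 1, hi, d + 1) :: (lo, i + 1, d + 1) :: rest) (max best d)
        | none => altLoop P rest (max best d))
        = altLoop P rest (max best d) := by
      split
      · rename_i j hj
        rw [hf] at hj
        simp at hj
      · rfl
    rw [hstep, ih, List.map_cons, List.foldl_cons]
    congr 1
    rw [altSolve_nosplit P lo hi h hm h0 hf, add_zero]

theorem altPrefix_getD : ∀ (xs : List Int) (acc : Int) (i : Nat), i < xs.length →
    (altPrefix xs acc).getD i 0 = acc + (xs.take (i + 1)).sum := by
  intro xs
  induction xs with
  | nil => intro acc i h; simp at h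
  | cons x xs ih =>
    intro acc i h
    cases i with
    | zero => simp [altPrefix]
    | succ j =>
      simp only [altPrefix, List.getD_cons_succ, List.take_succ_cons, List.sum_cons]
      rw [ih (acc + x) j (by simpa using Nat.lt_of_succ_lt_succ h)]
      ring

theorem pget_prefix (arr : List Int) (i : Nat) (h : i ≤ arr.length) :
    pget (0 :: altPrefix arr 0) i = (arr.take i).sum := by
  cases i with
  | zero => simp [pget]
  | succ j =>
    simp only [pget, List.getD_cons_succ]
    rw [altPrefix_getD arr 0 j (by omega)]
    ring

theorem pget_succ (arr : List Int) (lo : Nat) (h : lo < arr.length) :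
    pget (0 :: altPrefix arr 0) (lo + 1)
      = pget (0 :: altPrefix arr 0) lo + arr[lo] := by
  rw [pget_prefix arr (lo + 1) (by omega), pget_prefix arr lo (by omega)]
  exact List.sum_take_succ arr lo h

theorem seg_sum (arr : List Int) (lo c : Nat) (h : lo + c ≤ arr.length) :
    ((arr.drop lo).take c).sum
      = pget (0 :: altPrefix arr 0) (lo + c) - pget (0 :: altPrefix arr 0) lo := by
  rw [pget_prefix arr (lo + c) h, pget_prefix arr lo (by omega)]
  rw [List.take_add, List.sum_append]
  ring

theorem seg_len (arr : List Int) (lo c : Nat) (h : lo + c ≤ arr.length) :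
    ((arr.drop lo).take c).length = c := by
  simp [List.length_take, List.length_drop]; omega

theorem find_corr (arr : List Int) : ∀ (c lo : Nat) (base t : Int), lo + c ≤ arr.length →
    nikitaFind ((arr.drop lo).take c) t (pget (0 :: altPrefix arr 0) lo - base)
      = (altFind (0 :: altPrefix arr 0) base t lo c).map (fun i => i - lo) := by
  intro c
  induction c with
  | zero => intro lo base t h; simp [nikitaFind, altFind]
  | succ c ih =>
    intro lo base t h
    have hlo : lo < arr.length := by omega
    rw [List.drop_eq_getElem_cons hlo]
    simp only [List.take_succ_cons, nikitaFind, altFind]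
    have hps := pget_succ arr lo hlo
    by_cases hc : pget (0 :: altPrefix arr 0) (lo + 1) - base = t
    · rw [if_pos (by omega), if_pos hc]
      simp
    · rw [if_neg (by omega), if_neg hc]
      have heq : pget (0 :: altPrefix arr 0) lo - base + arr[lo]
          = pget (0 :: altPrefix arr 0) (lo + 1) - base := by omega
      rw [heq, ih (lo + 1) base t (by omega)]
      cases hf : altFind (0 :: altPrefix arr 0) base t (lo + 1) c with
      | none => simp
      | some i =>
        obtain ⟨h1, _, _⟩ := altFind_spec _ _ _ _ _ _ hf
        simp only [Option.map_some]
        congr 1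
        omega

theorem main_corr (arr : List Int) : ∀ (c lo : Nat), lo + c ≤ arr.length →
    altSolve (0 :: altPrefix arr 0) lo (lo + c) = nikita ((arr.drop lo).take c) := by
  intro c
  induction c using Nat.strong_induction_on with
  | _ c ih =>
    intro lo hlen
    set P := (0 :: altPrefix arr 0) with hP
    set seg := (arr.drop lo).take c with hseg
    have hsl : seg.length = c := seg_len arr lo c hlen
    have hss : seg.sum = pget P (lo + c) - pget P lo := seg_sum arr lo c hlen
    rw [altSolve, nikita, Nat.add_sub_cancel_left, hsl, hss]
    by_cases hsmall : c ≤ 1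
    · rw [if_pos hsmall, if_pos (by omega)]
    · rw [if_neg hsmall, if_neg (by omega)]
      by_cases hm : PySem.Int.mod (pget P (lo + c) - pget P lo) 2 = 1
      · rw [dif_pos hm, dif_pos hm]
      · rw [dif_neg hm, dif_neg hm]
        by_cases h0 : pget P (lo + c) - pget P lo = 0
        · rw [dif_pos h0, dif_pos h0]
          push_cast
          omega
        · rw [dif_neg h0, dif_neg h0]
          have hfc := find_corr arr c lo (pget P lo)
            (PySem.Int.floordiv (pget P (lo + c) - pget P lo) 2) hlen
          rw [sub_self, ← hseg, ← hP] at hfc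
          split
          · rename_i i hf
            rw [hf] at hfc
            split
            · rename_i j hnf
              rw [hfc] at hnf
              obtain rfl := (Option.some.inj hnf).symm
              obtain ⟨hi1, hi2⟩ := alt_split_lt P lo (lo + c) i hm h0 (by
                rw [Nat.add_sub_cancel_left]; exact hf)
              have e1 : seg.take (i - lo + 1) = (arr.drop lo).take (i + 1 - lo) := by
                rw [hseg, List.take_take, show min (i - lo + 1) c = i + 1 - lo from by omega]
              have e2 : seg.drop (i - lo + 1) = (arr.drop (i + 1)).take (lo + c - (i + 1)) := by
                rw [hseg, List.drop_take, List.drop_drop,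
                  show lo + (i - lo + 1) = i + 1 from by omega,
                  show c - (i - lo + 1) = lo + c - (i + 1) from by omega]
              have ih1 := ih (i + 1 - lo) (by omega) lo (by omega)
              have ih2 := ih (lo + c - (i + 1)) (by omega) (i + 1) (by omega)
              rw [show lo + (i + 1 - lo) = i + 1 by omega] at ih1
              rw [show i + 1 + (lo + c - (i + 1)) = lo + c by omega] at ih2
              rw [e1, e2, ← ih1, ← ih2]
            · rename_i hnf
              rw [hfc] at hnf
              simp at hnf
          · rename_i hf
            rw [hf] at hfc
            split
            · rename_i j hnf
              rw [hfc] at hnf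
              simp at hnf
            · rfl

-- ===== VERDICT (by name: the statement is the Claim_ definition above) =====
theorem nikita_spec : Claim_equal_nikita := by
  unfold Claim_equal_nikita Spec_nikita
  intro arr _
  unfold nikita_alt
  rw [altLoop_inv]
  simp only [List.map_cons, List.map_nil, List.foldl_cons, List.foldl_nil, zero_add]
  rw [max_eq_right (altSolve_nonneg _ _ _)]
  have := main_corr arr arr.length 0 (by omega)
  simpa using this.symm
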